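-- pv_equiv track=rewrite | github.com/5brian/4256 | preclass/preclass_2.py | every_other_column
-- ===== SOURCE A (Python) =====
-- def every_other_column(m, n):
--     matrix = [[0 for _ in range(n)] for _ in range(m)]
--
--     count = 1
--
--     for col in range(0, n, 2):
--         for row in range(m):
--             matrix[row][col] = count
--             count +=1
--
--     return matrix
-- ===== SOURCE B (Python) =====
-- def every_other_column(m, n):
--     return [
--         [(col // 2) * m + row + 1 if col % 2 == 0 else 0 for col in range(n)]
--         for row in range(m)
--     ]
-- ===== Notes on version B (the rewrite author's own statement) =====
-- stated objective: alternative
-- what changed: replaces the imperative column-major fill with a stateful running counter by a single nested comprehension computing each cell directly from its row/column indices via the closed form (col//2)*m+row+1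
import Mathlib
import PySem

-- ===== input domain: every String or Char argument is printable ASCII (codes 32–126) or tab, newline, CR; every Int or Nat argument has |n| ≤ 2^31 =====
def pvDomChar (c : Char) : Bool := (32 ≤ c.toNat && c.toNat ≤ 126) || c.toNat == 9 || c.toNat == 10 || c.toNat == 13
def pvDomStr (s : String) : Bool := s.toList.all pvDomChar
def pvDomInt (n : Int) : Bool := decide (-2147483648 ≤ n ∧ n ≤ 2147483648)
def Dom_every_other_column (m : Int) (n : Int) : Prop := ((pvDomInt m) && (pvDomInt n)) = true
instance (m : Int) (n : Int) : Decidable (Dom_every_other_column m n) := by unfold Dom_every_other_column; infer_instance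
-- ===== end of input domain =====

-- B replaces A's column-major fill with a running counter by one nested comprehension
-- computing each cell in closed form from its indices (objective: alternative).

-- ===== PORT A =====
-- matrix[row][col] = v   (exact here: both indices come from range() so are nonnegative and in bounds)
def pvSetRC (mat : List (List Int)) (row col : Int) (v : Int) : List (List Int) :=
  mat.modify row.toNat (fun r => r.set col.toNat v)

def every_other_column (m : Int) (n : Int) : List (List Int) :=
  let matrix := (PySem.List.pyRange 0 m 1).map
    (fun _ => (PySem.List.pyRange 0 n 1).map (fun _ => (0 : Int)))
  let res := (PySem.List.pyRange 0 n 2).foldl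
    (fun (st : List (List Int) × Int) col =>
      (PySem.List.pyRange 0 m 1).foldl
        (fun st row => (pvSetRC st.1 row col st.2, st.2 + 1)) st)
    (matrix, 1)
  res.1

-- ===== PORT B =====
def every_other_column_alt (m : Int) (n : Int) : List (List Int) :=
  (PySem.List.pyRange 0 m 1).map (fun row =>
    (PySem.List.pyRange 0 n 1).map (fun col =>
      if PySem.Int.mod col 2 = 0 then (PySem.Int.floordiv col 2) * m + row + 1 else 0))

-- ===== PRECONDITION & SPEC =====
def Spec_every_other_column (m : Int) (n : Int) (out : List (List Int)) : Prop := out = every_other_column_alt m n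
instance (m : Int) (n : Int) (out : List (List Int)) : Decidable (Spec_every_other_column m n out) := by unfold Spec_every_other_column; infer_instance

-- ===== CLAIM (what is proved, stated in full; the proofs are below) =====
def Claim_equal_every_other_column : Prop := ∀ (m : Int) (n : Int), Dom_every_other_column m n → Spec_every_other_column m n (every_other_column m n)

-- ===== LEMMAS AND PROOFS =====

-- the matrix after the first j iterations of A's outer loop (proof-only helper)
def pvPartial (m n : Int) (j : Nat) : List (List Int) :=
  (PySem.List.pyRange 0 m 1).map (fun row =>
    (PySem.List.pyRange 0 n 1).map (fun col =>
      if PySem.Int.mod col 2 = 0 ∧ col < 2 * (j : Int) then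
        (PySem.Int.floordiv col 2) * m + row + 1 else 0))

theorem pvMod2 (c : Int) : PySem.Int.mod c 2 = c % 2 := by
  simp [PySem.Int.mod, Int.fmod_eq_emod]

theorem pvFloordiv2 (c : Int) : PySem.Int.floordiv c 2 = c / 2 :=
  PySem.Int.floordiv_eq_ediv_of_pos (by norm_num)

theorem pvInner (m col : Int) (a : Int) (rows : List (List Int)) (c : Int)
    (ha : 0 ≤ a) (ham : a ≤ m) (hlen : rows.length = (m - a).toNat + a.toNat) :
    (PySem.List.pyRange a m 1).foldl
      (fun (st : List (List Int) × Int) row => (pvSetRC st.1 row col st.2, st.2 + 1)) (rows, c)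
    = (rows.mapIdx (fun i r => if a ≤ (i : Int) then r.set col.toNat (c + i - a) else r),
       c + (m - a)) := by
  induction hN : (m - a).toNat generalizing a rows c with
  | zero =>
    have hma : m ≤ a := by omega
    rw [PySem.List.pyRange_one_eq_nil hma]
    simp only [List.foldl_nil]
    refine Prod.ext ?_ ?_
    · apply Eq.symm
      apply List.ext_getElem
      · simp
      · intro i h1 h2
        rw [List.getElem_mapIdx, if_neg]
        have : i < rows.length := h2
        rw [hlen] at this
        omega
    · simp; omega
  | succ N ih =>
    have hlt : a < m := by omega
    rw [PySem.List.pyRange_one_cons hlt]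
    simp only [List.foldl_cons]
    rw [ih (a + 1) (pvSetRC rows a col c) (c + 1) (by omega) (by omega)
        (by simp [pvSetRC, hlen]; omega) (by omega)]
    refine Prod.ext ?_ ?_
    · apply List.ext_getElem
      · simp [pvSetRC]
      · intro i h1 h2
        rw [List.getElem_mapIdx, List.getElem_mapIdx]
        simp only [pvSetRC]
        rw [List.getElem_modify]
        by_cases hi : a.toNat = i
        · have hia : (i : Int) = a := by omega
          rw [if_pos hi, if_neg (by omega), if_pos (by omega), hia]
          norm_num
        · rw [if_neg hi]
          by_cases hle : a ≤ (i : Int)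
          · rw [if_pos (by omega), if_pos hle]
            have : c + 1 + (i : Int) - (a + 1) = c + (i : Int) - a := by ring
            rw [this]
          · rw [if_neg (by omega), if_neg hle]
    · simp; ring

theorem pvOuterInv (m n : Int) (hm : 0 ≤ m) (j : Nat) (hj : j = 0 ∨ 2 * (j : Int) - 1 ≤ n) :
    (List.range j).foldl
      (fun (st : List (List Int) × Int) (k : Nat) =>
        (PySem.List.pyRange 0 m 1).foldl
          (fun (st : List (List Int) × Int) row =>
            (pvSetRC st.1 row (2 * (k : Int)) st.2, st.2 + 1)) st)
      (pvPartial m n 0, 1)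
    = (pvPartial m n j, 1 + (j : Int) * m) := by
  induction j with
  | zero => simp
  | succ j ih =>
    have hj' : 2 * (j : Int) + 1 ≤ n := by
      rcases hj with h | h
      · omega
      · push_cast at h; omega
    rw [List.range_succ, List.foldl_append]
    rw [ih (Or.inr (by omega))]
    simp only [List.foldl_cons, List.foldl_nil]
    rw [pvInner m (2 * (j : Int)) 0 (pvPartial m n j) (1 + (j : Int) * m) le_rfl hm
        (by simp [pvPartial])]
    refine Prod.ext ?_ ?_
    · apply List.ext_getElem
      · simp [pvPartial]
      · intro i h1 h2
        rw [List.getElem_mapIdx]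
        simp only [pvPartial, List.getElem_map]
        rw [if_pos (by positivity)]
        rw [PySem.List.getElem_pyRange_one]
        apply List.ext_getElem
        · simp
        · intro t ht1 ht2
          have htn : (t : Int) < n := by
            have := ht2
            simp [PySem.List.length_pyRange_one] at this
            omega
          rw [List.getElem_set, List.getElem_map, List.getElem_map,
              PySem.List.getElem_pyRange_one]
          have h2jn : 2 * (j : Int) < n := by omega
          by_cases hteq : (2 * (j : Int)).toNat = t
          · have ht : (t : Int) = 2 * (j : Int) := by omega
            rw [if_pos hteq, if_pos]
            · rw [ht, pvFloordiv2]
              have : (0 + 2 * (j : Int)) / 2 = (j : Int) := by omega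
              simp only [zero_add] at this ⊢
              rw [this]
              ring
            · constructor
              · rw [pvMod2]; omega
              · push_cast; omega
          · rw [if_neg hteq]
            simp only [pvMod2]
            simp only [zero_add]
            by_cases hev : (t : Int) % 2 = 0
            · by_cases hlt : (t : Int) < 2 * (j : Int)
              · rw [if_pos ⟨hev, hlt⟩, if_pos ⟨hev, by push_cast; omega⟩]
              · rw [if_neg (by tauto), if_neg]
                intro ⟨_, hc⟩
                push_cast at hc
                omega
            · rw [if_neg (by tauto), if_neg (by tauto)]
    · simp only
      push_cast
      ring

-- ===== VERDICT (by name: the statement is the Claim_ definition above) =====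
theorem every_other_column_spec : Claim_equal_every_other_column := by
  intro m n _
  unfold Spec_every_other_column
  simp only [every_other_column, every_other_column_alt]
  by_cases hm : 0 ≤ m
  · rw [PySem.List.pyRange_of_pos 0 n (by norm_num : (0:Int) < 2), List.foldl_map]
    set K : Nat := if 0 < n then ((n - 0 + 2 - 1) / 2).toNat else 0 with hK
    have h2K : ∀ col : Int, 0 ≤ col → col < n → col < 2 * (K : Int) := by
      intro col h1 h2
      have hn : 0 < n := by omega
      rw [hK, if_pos hn]
      omega
    have hinit : (PySem.List.pyRange 0 m 1).map
        (fun _ => (PySem.List.pyRange 0 n 1).map (fun _ => (0 : Int))) = pvPartial m n 0 := by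
      unfold pvPartial
      apply List.map_congr_left
      intro row _
      apply List.map_congr_left
      intro col hcol
      rw [PySem.List.mem_pyRange_one] at hcol
      rw [if_neg]
      push_cast
      omega
    rw [hinit]
    have hfold := pvOuterInv m n hm K ?_
    · simp only [zero_add]
      rw [hfold]
      unfold pvPartial
      apply List.map_congr_left
      intro row _
      apply List.map_congr_left
      intro col hcol
      rw [PySem.List.mem_pyRange_one] at hcol
      by_cases h : PySem.Int.mod col 2 = 0
      · rw [if_pos ⟨h, h2K col hcol.1 hcol.2⟩, if_pos h]
      · rw [if_neg (by tauto), if_neg h]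
    · rw [hK]
      split_ifs with hn
      · right; omega
      · left; rfl
  · have h0 : PySem.List.pyRange 0 m 1 = [] := PySem.List.pyRange_one_eq_nil (by omega)
    rw [h0]
    simp
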